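-- pv_equiv track=rewrite | github.com/Manojcs12/PythonProblem | Daily_practice/daily_active_user.py | daily_active_users
-- ===== SOURCE A (Python) =====
-- from collections import defaultdict
--
-- def daily_active_users(events: list[dict]) -> dict[str, int]:
--     users_by_date = defaultdict(set)
--
--     # Step 1: Group users by date
--     for event in events:
--         users_by_date[event["date"]].add(event["user"])
--
--     # Step 2: Build sorted result with counts
--     result = {}
--     for date in sorted(users_by_date.keys()):
--         result[date] = len(users_by_date[date])
--
--     return result
-- ===== SOURCE B (Python) =====
-- def daily_active_users(events: list[dict]) -> dict[str, int]:
--     return {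
--         date: len({e["user"] for e in events if e["date"] == date})
--         for date in sorted({e["date"] for e in events})
--     }
-- ===== Notes on version B (the rewrite author's own statement) =====
-- stated objective: idiomatic
-- what changed: Replaces the defaultdict-of-sets accumulation plus separate key-sort-and-rebuild loop with a single dict comprehension: sort the distinct dates, then for each date count the distinct users by a per-date filter.
import Mathlib
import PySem

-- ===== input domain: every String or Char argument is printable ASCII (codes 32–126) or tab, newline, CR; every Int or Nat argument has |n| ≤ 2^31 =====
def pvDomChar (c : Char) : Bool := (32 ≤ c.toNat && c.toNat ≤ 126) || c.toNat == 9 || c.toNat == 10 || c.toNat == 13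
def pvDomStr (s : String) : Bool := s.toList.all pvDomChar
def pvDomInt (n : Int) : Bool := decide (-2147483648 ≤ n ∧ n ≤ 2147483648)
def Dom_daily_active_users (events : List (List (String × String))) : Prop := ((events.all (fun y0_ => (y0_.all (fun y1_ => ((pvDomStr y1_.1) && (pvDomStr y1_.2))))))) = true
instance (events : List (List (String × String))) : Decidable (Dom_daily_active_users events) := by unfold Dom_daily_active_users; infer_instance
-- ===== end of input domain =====

-- B replaces A's defaultdict-of-sets pass + key-sort rebuild by a dict comprehension over the
-- sorted distinct dates with a per-date filter; same result, idiomatic rather than faster.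


-- ===== PORT A =====
-- events are Python dicts (association lists); event["date"] / event["user"] raise KeyError when
-- absent, so those lookups are read through getD under Pre_ (which guarantees both keys present).
def daily_active_users (events : List (List (String × String))) : List (String × Int) :=
  let users_by_date : PySem.Dict String (PySem.Set String) :=
    events.foldl
      (fun d e =>
        d.modify ((PySem.Dict.mk e).getD "date" "") PySem.Set.empty
          (fun s => PySem.Set.add s ((PySem.Dict.mk e).getD "user" "")))
      (PySem.Dict.mk [])
  ((PySem.List.sorted users_by_date.keys (fun x => x) false).foldl
      (fun r date => r.insert date (PySem.Set.len (users_by_date.getD date PySem.Set.empty)))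
      (PySem.Dict.mk ([] : List (String × Int)))).items

-- ===== PORT B =====
-- dict comprehension over the sorted distinct dates (distinct keys, so its items are this map)
def daily_active_users_alt (events : List (List (String × String))) : List (String × Int) :=
  (PySem.List.sorted
      (PySem.Set.ofList (events.map (fun e => (PySem.Dict.mk e).getD "date" "")))
      (fun x => x) false).map
    (fun date =>
      (date,
        PySem.Set.len (PySem.Set.ofList
          ((events.filter (fun e => (PySem.Dict.mk e).getD "date" "" == date)).map
            (fun e => (PySem.Dict.mk e).getD "user" "")))))

-- ===== PRECONDITION & SPEC =====
-- Pre_: every event has the keys "date" and "user"; on any other input Python A raises KeyError.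
def Pre_daily_active_users (events : List (List (String × String))) : Prop :=
  (events.all (fun e => (PySem.Dict.mk e).contains "date" && (PySem.Dict.mk e).contains "user")) = true
instance (events : List (List (String × String))) : Decidable (Pre_daily_active_users events) := by
  unfold Pre_daily_active_users; infer_instance
def pvWitness_daily_active_users : (List (List (String × String))) :=
  [[("date", "2024-01-01"), ("user", "alice")], [("date", "2024-01-01"), ("user", "bob")]]
def Spec_daily_active_users (events : List (List (String × String))) (out : List (String × Int)) : Prop := out = daily_active_users_alt events
instance (events : List (List (String × String))) (out : List (String × Int)) : Decidable (Spec_daily_active_users events out) := by unfold Spec_daily_active_users; infer_instance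

-- ===== CLAIM (what is proved, stated in full; the proofs are below) =====
def Claim_equal_daily_active_users : Prop := ∀ (events : List (List (String × String))), Dom_daily_active_users events → Pre_daily_active_users events → Spec_daily_active_users events (daily_active_users events)

-- ===== LEMMAS AND PROOFS =====

-- A's grouping fold, read back per key: the set accumulated at c is exactly the users of the
-- events whose date is c, added in order (specific to the two ports' loop shapes).
theorem getD_foldl_modify_setAdd (key val : List (String × String) → String)
    (l : List (List (String × String))) (d : PySem.Dict String (PySem.Set String)) (c : String) :
    (l.foldl (fun d e => d.modify (key e) PySem.Set.empty (fun s => PySem.Set.add s (val e))) d).getD c PySem.Set.empty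
      = PySem.Set.update (d.getD c PySem.Set.empty) ((l.filter (fun e => key e == c)).map val) := by
  induction l generalizing d with
  | nil => simp [PySem.Set.update]
  | cons e t ih =>
    simp only [List.foldl_cons, List.filter_cons, ih, PySem.Dict.getD_modify]
    by_cases h : c = key e
    · simp [h, PySem.Set.update]
    · have h' : (key e == c) = false := beq_eq_false_iff_ne.mpr (fun hh => h hh.symm)
      simp [if_neg h, h']

theorem daily_active_users_spec : Claim_equal_daily_active_users := by
  unfold Claim_equal_daily_active_users Spec_daily_active_users
  intro events _ _
  simp only [daily_active_users, daily_active_users_alt]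
  rw [PySem.Dict.keys_foldl_modify_key events
        (fun e => (PySem.Dict.mk e).getD "date" "") PySem.Set.empty
        (fun _ e => fun s => PySem.Set.add s ((PySem.Dict.mk e).getD "user" "")) (PySem.Dict.mk [])]
  have hkeys : PySem.Set.update ((PySem.Dict.mk ([] : List (String × PySem.Set String))).keys)
      (events.map (fun e => (PySem.Dict.mk e).getD "date" ""))
      = PySem.Set.ofList (events.map (fun e => (PySem.Dict.mk e).getD "date" "")) := by
    simp [PySem.Dict.keys, PySem.Set.update, PySem.Set.ofList_eq_foldl]
  rw [hkeys]
  have hval : ∀ c : String,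
      (events.foldl (fun d e =>
          d.modify ((PySem.Dict.mk e).getD "date" "") ([] : PySem.Set String)
            (fun s => PySem.Set.add s ((PySem.Dict.mk e).getD "user" ""))) (PySem.Dict.mk [])).getD c ([] : PySem.Set String)
        = PySem.Set.ofList ((events.filter (fun e => (PySem.Dict.mk e).getD "date" "" == c)).map
            (fun e => (PySem.Dict.mk e).getD "user" "")) := by
    intro c
    have h := getD_foldl_modify_setAdd (fun e => (PySem.Dict.mk e).getD "date" "")
      (fun e => (PySem.Dict.mk e).getD "user" "") events (PySem.Dict.mk []) c
    simpa [PySem.Set.empty, PySem.Set.update, PySem.Set.ofList_eq_foldl,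
      PySem.Dict.getD, PySem.Dict.get?] using h
  have hnodup : (PySem.List.sorted
      (PySem.Set.ofList (events.map (fun e => (PySem.Dict.mk e).getD "date" ""))) (fun x => x) false).Nodup := by
    exact ((PySem.List.sorted_perm _ _ _).nodup_iff).mpr (PySem.Set.nodup_ofList _)
  rw [PySem.Dict.items_foldl_insert_fresh _ (fun a => a) _ (PySem.Dict.mk [])
        (by intro a _; simp [PySem.Dict.contains])
        (by simpa using hnodup)]
  simp
  intro a _
  exact congrArg List.length (hval _)
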